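-- pv_equiv track=rewrite | github.com/shadowplay1/ege_tasks | utils/count_num_in_arr.py | find_number_repeated_three_times
-- ===== SOURCE A (Python) =====
-- def find_number_repeated_three_times(nums):
--     count = {}
--     # Подсчет частоты каждого элемента
--     for num in nums:
--         if num in count:
--             count[num] += 1
--         else:
--             count[num] = 1
--
--     # Поиск числа, повторяющегося ровно три раза
--     for num, freq in count.items():
--         if freq == 3:
--             return num
--
--     return None
-- ===== SOURCE B (Python) =====
-- def find_number_repeated_three_times(nums):
--     for num in nums:
--         if nums.count(num) == 3:
--             return num
--     return None
-- ===== Notes on version B (the rewrite author's own statement) =====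
-- stated objective: simpler
-- what changed: Drops the frequency dictionary: B scans nums directly and returns the first element whose total count in nums is 3 (the first insertion-order key with frequency 3 is exactly the first element of nums with total count 3).
import Mathlib
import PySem

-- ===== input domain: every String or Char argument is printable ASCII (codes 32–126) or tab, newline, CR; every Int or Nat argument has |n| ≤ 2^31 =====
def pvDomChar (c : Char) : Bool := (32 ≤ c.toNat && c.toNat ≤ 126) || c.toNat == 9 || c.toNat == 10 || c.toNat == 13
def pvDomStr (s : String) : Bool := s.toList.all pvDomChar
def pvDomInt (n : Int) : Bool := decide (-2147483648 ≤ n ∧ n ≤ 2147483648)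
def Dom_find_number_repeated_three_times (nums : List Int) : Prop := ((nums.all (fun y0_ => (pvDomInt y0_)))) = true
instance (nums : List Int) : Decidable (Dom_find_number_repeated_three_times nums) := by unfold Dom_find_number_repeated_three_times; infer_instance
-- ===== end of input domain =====

-- B replaces A's frequency dictionary by a direct scan of nums using nums.count (simpler, not faster).

-- ===== PORT A =====
-- second loop of A: first (num, freq) in the dict's items with freq == 3
def pvFindFreq3 : List (Int × Int) → Option Int
  | [] => none
  | (num, freq) :: rest => if freq == 3 then some num else pvFindFreq3 rest

def find_number_repeated_three_times (nums : List Int) : Option Int :=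
  let count := nums.foldl
    (fun d num =>
      if d.contains num then d.insert num (d.getD num 0 + 1) else d.insert num 1)
    (PySem.Dict.empty : PySem.Dict Int Int)
  pvFindFreq3 count.items

-- ===== PORT B =====
-- B's loop: first num in the remaining list with nums.count(num) == 3
def pvScanCount (nums : List Int) : List Int → Option Int
  | [] => none
  | num :: rest => if PySem.List.count nums num == 3 then some num else pvScanCount nums rest

def find_number_repeated_three_times_alt (nums : List Int) : Option Int :=
  pvScanCount nums nums

-- ===== PRECONDITION & SPEC =====
def Spec_find_number_repeated_three_times (nums : List Int) (out : Option Int) : Prop := out = find_number_repeated_three_times_alt nums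
instance (nums : List Int) (out : Option Int) : Decidable (Spec_find_number_repeated_three_times nums out) := by unfold Spec_find_number_repeated_three_times; infer_instance

-- ===== CLAIM (what is proved, stated in full; the proofs are below) =====
def Claim_equal_find_number_repeated_three_times : Prop := ∀ (nums : List Int), Dom_find_number_repeated_three_times nums → Spec_find_number_repeated_three_times nums (find_number_repeated_three_times nums)

-- ===== LEMMAS AND PROOFS =====

theorem getD_zero_of_not_contains (d : PySem.Dict Int Int) (x : Int)
    (h : d.contains x = false) : d.getD x 0 = 0 := by
  simp [PySem.Dict.contains, List.any_eq_false] at h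
  have hf : List.find? (fun p => p.1 == x) d.items = none := by
    apply List.find?_eq_none.mpr
    intro p hp
    simpa using h p.1 p.2 hp
  simp [PySem.Dict.getD, PySem.Dict.get?, hf]

theorem fold_eq_counter (nums : List Int) :
    nums.foldl
      (fun d num =>
        if d.contains num then d.insert num (d.getD num 0 + 1) else d.insert num 1)
      (PySem.Dict.empty : PySem.Dict Int Int) = PySem.Dict.counter nums := by
  rw [← PySem.Dict.foldl_insert_getD_add_one_eq_counter]
  congr 1
  funext d x
  by_cases h : d.contains x
  · simp [h]
  · simp [eq_false_of_ne_true h, getD_zero_of_not_contains d x (eq_false_of_ne_true h)]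

theorem pvFindFreq3_eq_find? (l : List (Int × Int)) :
    pvFindFreq3 l = (l.find? (fun p => p.2 == 3)).map (·.1) := by
  induction l with
  | nil => rfl
  | cons a rest ih =>
    obtain ⟨num, freq⟩ := a
    by_cases h : freq = 3
    · rw [List.find?_cons_of_pos (by simpa using h)]
      simp [pvFindFreq3, h]
    · rw [List.find?_cons_of_neg (by simpa using h)]
      simpa [pvFindFreq3, h] using ih

theorem pvScanCount_eq_find? (nums l : List Int) :
    pvScanCount nums l = l.find? (fun x => PySem.List.count nums x == 3) := by
  induction l with
  | nil => rfl
  | cons x rest ih =>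
    by_cases h : List.count x nums = 3
    · rw [List.find?_cons_of_pos (by simp [PySem.List.count, h])]
      simp [pvScanCount, PySem.List.count, h]
    · rw [List.find?_cons_of_neg (by simp [PySem.List.count, h])]
      simpa [pvScanCount, PySem.List.count, h] using ih

theorem find?_discard (p : Int → Bool) (x : Int) (h : p x = false) (l : List Int) :
    (PySem.Set.discard l x).find? p = l.find? p := by
  induction l with
  | nil => rfl
  | cons a rest ih =>
    by_cases ha : a = x
    · subst ha
      rw [List.find?_cons_of_neg (by simp [h])]
      simpa [PySem.Set.discard, List.filter_cons] using ih
    · by_cases hp : p a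
      · simp [PySem.Set.discard, List.filter_cons, ha, List.find?_cons_of_pos hp]
      · simp [PySem.Set.discard, List.filter_cons, ha, List.find?_cons_of_neg (by simpa using hp)]
        simpa [PySem.Set.discard] using ih

theorem find?_ofList (p : Int → Bool) (xs : List Int) :
    (PySem.Set.ofList xs).find? p = xs.find? p := by
  induction xs with
  | nil => rfl
  | cons x rest ih =>
    rw [PySem.Set.ofList_cons]
    by_cases hp : p x
    · rw [List.find?_cons_of_pos hp, List.find?_cons_of_pos hp]
    · rw [List.find?_cons_of_neg (by simpa using hp),
        List.find?_cons_of_neg (by simpa using hp),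
        find?_discard p x (eq_false_of_ne_true hp), ih]

-- ===== VERDICT (by name: the statement is the Claim_ definition above) =====
theorem find_number_repeated_three_times_spec : Claim_equal_find_number_repeated_three_times := by
  intro nums _
  show find_number_repeated_three_times nums = find_number_repeated_three_times_alt nums
  unfold find_number_repeated_three_times find_number_repeated_three_times_alt
  rw [fold_eq_counter, pvScanCount_eq_find?, pvFindFreq3_eq_find?,
    PySem.Dict.items_counter, List.find?_map, find?_ofList, Option.map_map]
  have hpred : ((fun p => p.2 == 3) ∘ fun k => ((k, (List.count k nums : Int)) : Int × Int))
      = (fun x => PySem.List.count nums x == 3) := by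
    funext k
    simp only [Function.comp, PySem.List.count]
    by_cases h : List.count k nums = 3
    · simp [h]
    · simp [h]
      omega
  rw [hpred]
  have hid : ((fun x : Int × Int => x.1) ∘ fun k : Int => (k, (List.count k nums : Int))) = id := rfl
  rw [hid, Option.map_id]
  rfl
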